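-- pv_equiv track=rewrite | github.com/singhScriptor/DsaPython | ARRAY/minimumColor.py | miniColor
-- ===== SOURCE A (Python) =====
-- def miniColor(s,k):
--     if(k>len(s)):return
--     mini=float('inf')
--     for i in range(len(s)-k+1):
--         count=0
--         for j in range(i,i+k):
--             if(s[j]=='W'):
--                 count+=1
--         mini=min(mini,count)
--     return mini
--
-- s="BWBBW"
--
-- k=3
-- ===== SOURCE B (Python) =====
-- def miniColor(s, k):
--     n = len(s)
--     if k > n:
--         return None
--     if k <= 0:
--         return 0
--     cnt = s[:k].count('W')
--     best = cnt
--     for i in range(k, n):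
--         cnt += (s[i] == 'W') - (s[i - k] == 'W')
--         if cnt < best:
--             best = cnt
--     return best
-- ===== Notes on version B (the rewrite author's own statement) =====
-- stated objective: faster
-- what changed: Replaces the nested rescan of every size-k window with a single sliding-window pass that updates the 'W' count incrementally (and returns 0 directly for k <= 0, where every window is empty).
import Mathlib
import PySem

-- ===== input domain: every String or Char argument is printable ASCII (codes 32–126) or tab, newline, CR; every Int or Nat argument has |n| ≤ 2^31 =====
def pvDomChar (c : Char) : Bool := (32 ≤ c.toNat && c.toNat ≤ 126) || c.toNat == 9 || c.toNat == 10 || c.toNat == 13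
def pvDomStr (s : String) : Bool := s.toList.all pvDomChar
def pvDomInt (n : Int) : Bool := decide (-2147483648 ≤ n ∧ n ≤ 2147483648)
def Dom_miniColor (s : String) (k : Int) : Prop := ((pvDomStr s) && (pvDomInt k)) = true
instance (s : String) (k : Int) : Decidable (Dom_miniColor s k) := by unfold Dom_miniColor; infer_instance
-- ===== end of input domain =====

-- B replaces A's O(n*k) rescan of every window by a single O(n) sliding-window pass
-- that updates the 'W' count incrementally; proven to return exactly A's value.

-- ===== PORT A =====
-- literal transliteration of A: rescan each size-k window; mini = float('inf') is the
-- `none` state of the Option Int accumulator (min(inf, c) = c on the first window).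
def miniColor (s : String) (k : Int) : Option Int :=
  let l := s.toList
  if k > (l.length : Int) then none
  else
    (PySem.List.pyRange 0 ((l.length : Int) - k + 1) 1).foldl
      (fun (mini : Option Int) i =>
        let count : Int := (PySem.List.pyRange i (i + k) 1).foldl
          (fun (c : Int) j => if PySem.List.pyGet? l j = some 'W' then c + 1 else c) 0
        match mini with
        | none => some count
        | some m => some (min m count)) none

-- ===== PORT B =====
-- transliteration of Source B: one sliding-window pass with incremental count.
-- s[:k].count('W') is a single-character count: exact as List.count on the slice.
def miniColor_alt (s : String) (k : Int) : Option Int :=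
  let l := s.toList
  let n : Int := l.length
  if k > n then none
  else if k ≤ 0 then some 0
  else
    let cnt0 : Int := (PySem.List.slice l none (some k)).count 'W'
    let r := (PySem.List.pyRange k n 1).foldl
      (fun (st : Int × Int) i =>
        let cnt := st.2 + (if PySem.List.pyGet? l i = some 'W' then 1 else 0)
                        - (if PySem.List.pyGet? l (i - k) = some 'W' then 1 else 0)
        (if cnt < st.1 then cnt else st.1, cnt)) (cnt0, cnt0)
    some r.1

-- ===== PRECONDITION & SPEC =====
def Spec_miniColor (s : String) (k : Int) (out : Option Int) : Prop := out = miniColor_alt s k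
instance (s : String) (k : Int) (out : Option Int) : Decidable (Spec_miniColor s k out) := by unfold Spec_miniColor; infer_instance

-- ===== CLAIM (what is proved, stated in full; the proofs are below) =====
def Claim_equal_miniColor : Prop := ∀ (s : String) (k : Int), Dom_miniColor s k → Spec_miniColor s k (miniColor s k)

-- ===== LEMMAS AND PROOFS =====

-- number of 'W' in the window of length kn starting at position i
def pvW (l : List Char) (kn i : Nat) : Int := (((l.drop i).take kn).count 'W' : Int)

-- minimum of pvW over the windows 0 .. t
def pvWmin (l : List Char) (kn : Nat) : Nat → Int
  | 0 => pvW l kn 0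
  | t + 1 => min (pvWmin l kn t) (pvW l kn (t + 1))

-- A's inner loop counts the 'W's of the window starting at i (the take clamps exactly
-- as the loop's in-range accesses do, since windows never leave the string).
lemma pv_inner (l : List Char) (kn : Nat) :
    ∀ (i : Nat) (c : Int),
      (PySem.List.pyRange (i : Int) ((i : Int) + (kn : Int)) 1).foldl
        (fun (c : Int) j => if PySem.List.pyGet? l j = some 'W' then c + 1 else c) c
      = c + pvW l kn i := by
  induction kn with
  | zero =>
      intro i c
      rw [PySem.List.pyRange_one_eq_nil (by omega)]
      simp [pvW]
  | succ m ih =>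
      intro i c
      rw [PySem.List.pyRange_one_cons (by push_cast; omega), List.foldl_cons]
      have h2 : (i : Int) + ((m + 1 : Nat) : Int) = ((i + 1 : Nat) : Int) + (m : Int) := by
        push_cast; omega
      have h1 : ((i : Int) + 1) = ((i + 1 : Nat) : Int) := by push_cast; omega
      rw [h2, h1, ih (i + 1), PySem.List.pyGet?_natCast]
      by_cases hlen : i < l.length
      · have hget : l[i]? = some l[i] := List.getElem?_eq_getElem hlen
        have hpv : pvW l (m + 1) i
            = pvW l m (i + 1) + (if l[i] = 'W' then (1 : Int) else 0) := by
          simp only [pvW, List.drop_eq_getElem_cons hlen, List.take_succ_cons,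
            List.count_cons]
          by_cases hw : l[i] = 'W' <;> simp [hw]
        rw [hpv]
        by_cases hw : l[i] = 'W'
        · simp only [hget, hw, if_pos]; ring
        · have hne : ¬ (l[i]? = some 'W') := by simp [hget, hw]
          rw [if_neg hne, if_neg hw]; ring
      · have hget : l[i]? = none := by
          rw [List.getElem?_eq_none_iff]; omega
        have hd : l.drop i = [] := List.drop_eq_nil_of_le (by omega)
        have hd' : l.drop (i + 1) = [] := List.drop_eq_nil_of_le (by omega)
        simp [hget, pvW, hd, hd']

-- A's outer loop computes the running minimum of the window counts.
lemma pv_outer (l : List Char) (kn : Nat) :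
    ∀ (t : Nat),
      (PySem.List.pyRange 0 ((t : Int) + 1) 1).foldl
        (fun (mini : Option Int) i =>
          let count : Int := (PySem.List.pyRange i (i + (kn : Int)) 1).foldl
            (fun (c : Int) j => if PySem.List.pyGet? l j = some 'W' then c + 1 else c) 0
          match mini with
          | none => some count
          | some m => some (min m count)) none
      = some (pvWmin l kn t) := by
  intro t
  induction t with
  | zero =>
      rw [show ((0 : Nat) : Int) + 1 = (0 : Int) + 1 by norm_num,
          PySem.List.pyRange_one_singleton, List.foldl_cons, List.foldl_nil]
      have h := pv_inner l kn 0 0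
      simp only [Nat.cast_zero, zero_add] at h
      simp [h, pvWmin]
  | succ m ih =>
      rw [show ((m + 1 : Nat) : Int) + 1 = ((m : Int) + 1) + 1 by push_cast; ring,
          PySem.List.pyRange_one_succ_right (by omega), List.foldl_append, ih,
          List.foldl_cons, List.foldl_nil]
      have h := pv_inner l kn (m + 1) 0
      rw [show ((m : Int) + 1) = ((m + 1 : Nat) : Int) by push_cast; ring, h]
      simp [pvWmin]

-- sliding step: the count of window t+1 from the count of window t
lemma pv_slide (l : List Char) (kn t : Nat) (h : t + kn < l.length) :
    pvW l kn (t + 1)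
      = pvW l kn t + (if l[t + kn]? = some 'W' then (1 : Int) else 0)
                   - (if l[t]? = some 'W' then (1 : Int) else 0) := by
  have ht : t < l.length := by omega
  have hcons : (l.drop t).take (kn + 1) = l[t] :: (l.drop (t + 1)).take kn := by
    rw [List.drop_eq_getElem_cons ht, List.take_succ_cons]
  have hsnoc : (l.drop t).take (kn + 1) = (l.drop t).take kn ++ [l[t + kn]] := by
    rw [List.take_add_one, List.getElem?_drop]
    have : l[t + kn]? = some l[t + kn] := List.getElem?_eq_getElem h
    simp [this]
  have e1 : ((l.drop t).take (kn + 1)).count 'W'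
      = (if l[t] = 'W' then 1 else 0) + ((l.drop (t + 1)).take kn).count 'W' := by
    rw [hcons, List.count_cons]
    by_cases hw : l[t] = 'W' <;> simp [hw] <;> try omega
  have e2 : ((l.drop t).take (kn + 1)).count 'W'
      = ((l.drop t).take kn).count 'W' + (if l[t + kn] = 'W' then 1 else 0) := by
    rw [hsnoc, List.count_append, List.count_singleton]
    by_cases hw : l[t + kn] = 'W' <;> · simp [hw, beq_iff_eq]
  have g1 : l[t]? = some l[t] := List.getElem?_eq_getElem ht
  have g2 : l[t + kn]? = some l[t + kn] := List.getElem?_eq_getElem h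
  have key : (if l[t] = 'W' then (1 : Nat) else 0) + ((l.drop (t + 1)).take kn).count 'W'
      = ((l.drop t).take kn).count 'W' + (if l[t + kn] = 'W' then 1 else 0) :=
    e1.symm.trans e2
  simp only [pvW, g1, g2, Option.some.injEq]
  by_cases h1 : l[t] = 'W' <;> by_cases h2 : l[t + kn] = 'W' <;>
    simp [h1, h2] at key ⊢ <;> omega

-- B's loop invariant: after processing indices kn .. kn+t-1 the state is
-- (minimum of the first t+1 window counts, count of window t).
lemma pv_binv (l : List Char) (kn : Nat) :
    ∀ (t : Nat), t + kn ≤ l.length →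
      (PySem.List.pyRange (kn : Int) ((kn : Int) + (t : Int)) 1).foldl
        (fun (st : Int × Int) i =>
          let cnt := st.2 + (if PySem.List.pyGet? l i = some 'W' then (1 : Int) else 0)
                          - (if PySem.List.pyGet? l (i - (kn : Int)) = some 'W' then (1 : Int) else 0)
          (if cnt < st.1 then cnt else st.1, cnt)) (pvW l kn 0, pvW l kn 0)
      = (pvWmin l kn t, pvW l kn t) := by
  intro t
  induction t with
  | zero =>
      intro _
      rw [show ((kn : Int) + (0 : Nat)) = (kn : Int) by push_cast; ring]
      rw [PySem.List.pyRange_one_eq_nil le_rfl]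
      simp [pvWmin]
  | succ m ih =>
      intro hle
      rw [show (kn : Int) + ((m + 1 : Nat) : Int) = ((kn : Int) + (m : Int)) + 1 by
            push_cast; ring,
          PySem.List.pyRange_one_succ_right (by omega), List.foldl_append,
          ih (by omega), List.foldl_cons, List.foldl_nil]
      have hidx : (kn : Int) + (m : Int) = ((m + kn : Nat) : Int) := by push_cast; ring
      rw [hidx, show ((m + kn : Nat) : Int) - (kn : Int) = ((m : Nat) : Int) by
            push_cast; ring,
          PySem.List.pyGet?_natCast, PySem.List.pyGet?_natCast]
      have hs := pv_slide l kn m (by omega)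
      have hifmin : (if pvW l kn (m + 1) < pvWmin l kn m
            then pvW l kn (m + 1) else pvWmin l kn m) = pvWmin l kn (m + 1) := by
        simp only [pvWmin]
        rcases lt_or_ge (pvW l kn (m + 1)) (pvWmin l kn m) with h | h
        · rw [if_pos h, min_eq_right h.le]
        · rw [if_neg (not_lt.mpr h), min_eq_left h]
      simp only []
      rw [← hs, hifmin]

-- for k ≤ 0 every window is empty: A's running minimum stays 0 once seeded
lemma pv_zero_tail (f : Option Int → Int → Option Int)
    (hf : ∀ i, f (some 0) i = some 0) :
    ∀ (xs : List Int), xs.foldl f (some 0) = some 0 := by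
  intro xs
  induction xs with
  | nil => rfl
  | cons x rest ih => rw [List.foldl_cons, hf x, ih]

-- ===== VERDICT (by name: the statement is the Claim_ definition above) =====
theorem miniColor_spec : Claim_equal_miniColor := by
  intro s k _
  unfold Spec_miniColor miniColor miniColor_alt
  set l := s.toList with hl
  by_cases hgt : k > (l.length : Int)
  · simp only [hgt, if_pos]
  · rw [if_neg hgt, if_neg hgt]
    by_cases hk0 : k ≤ 0
    · -- every window is empty; A's minimum of zeros is 0
      rw [if_pos hk0]
      have hempty : ∀ i : Int, PySem.List.pyRange i (i + k) 1 = [] := fun i =>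
        PySem.List.pyRange_one_eq_nil (by omega)
      have hstep : (fun (mini : Option Int) (i : Int) =>
          let count : Int := (PySem.List.pyRange i (i + k) 1).foldl
            (fun (c : Int) j => if PySem.List.pyGet? l j = some 'W' then c + 1 else c) 0
          match mini with
          | none => some count
          | some m => some (min m count))
          = (fun (mini : Option Int) (_ : Int) =>
              match mini with
              | none => some (0 : Int)
              | some m => some (min m 0)) := by
        funext mini i
        simp [hempty i]
      rw [hstep]
      have hne : (0 : Int) < (l.length : Int) - k + 1 := by omega
      rw [show ((l.length : Int) - k + 1) = 0 + ((l.length : Int) - k) + 1 by ring]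
      rw [PySem.List.pyRange_one_cons (by omega), List.foldl_cons]
      exact pv_zero_tail _ (fun i => by simp) _
    · -- 1 ≤ k ≤ len: both sides compute the minimum window count
      rw [if_neg hk0]
      have hk1 : 1 ≤ k := by omega
      have hkl : k ≤ (l.length : Int) := le_of_not_gt hgt
      set kn := k.toNat with hkn
      have hkc : (kn : Int) = k := Int.toNat_of_nonneg (by omega)
      have hknl : kn ≤ l.length := by omega
      have hkn1 : 1 ≤ kn := by omega
      -- A's side
      have hA : (l.length : Int) - k + 1 = ((l.length - kn : Nat) : Int) + 1 := by
        omega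
      have houter := pv_outer l kn (l.length - kn)
      rw [hA]
      have hAeq : (PySem.List.pyRange 0 (((l.length - kn : Nat) : Int) + 1) 1).foldl
          (fun (mini : Option Int) i =>
            let count : Int := (PySem.List.pyRange i (i + k) 1).foldl
              (fun (c : Int) j => if PySem.List.pyGet? l j = some 'W' then c + 1 else c) 0
            match mini with
            | none => some count
            | some m => some (min m count)) none
          = some (pvWmin l kn (l.length - kn)) := by
        rw [← hkc]; exact houter
      rw [hAeq]
      -- B's side
      have hcnt0 : ((PySem.List.slice l none (some k)).count 'W' : Int) = pvW l kn 0 := by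
        rw [PySem.List.slice_to (xs := l) (b := k) (by omega)]
        simp only [pvW, List.drop_zero]
        rw [hkn]
      have hB : (l.length : Int) = (kn : Int) + ((l.length - kn : Nat) : Int) := by
        omega
      have hbinv := pv_binv l kn (l.length - kn) (by omega)
      rw [hcnt0, hB, ← hkc]
      simp only [hbinv]
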